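/- GENERATED by farm/mkstatement.py from design/units.tsv (unit `_sub_I_65535_1`) and the Specs of Toy/Spec/*.lean — do not edit.
   THE STATEMENT of the proof unit `_sub_I_65535_1`: the function `_sub_I_65535_1` (6 instructions) satisfies its contract,
   given the contracts of its callees. What the names mean: ProgX/Base/Spec/Basic.lean. The theorem to prove:
   `theorem sub_I_65535_1_ok : Toy.Spec.sub_I_65535_1.Statement`. -/
import Toy.Code
import Toy.Dec.All
import Toy.Labels
import Toy.Spec.Runtime
namespace Toy.Spec.sub_I_65535_1
open X86 X86.User Asan

/-- The statement of unit `_sub_I_65535_1`. -/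
def Statement : Prop :=
  ∀ (Lay : Layout) (_hLay : Lay.hi = 0x1000000) (μ : Microarch) (_hμ : UserX.MicroOK μ) (u₀ : State)
    (_hcode : HasCodeNat Lay u₀ Toy.L._sub_I_65535_1.entry Toy.Code.code__sub_I_65535_1.nat Toy.L._sub_I_65535_1.size)
    (_h_asan_register_globals : Calls Lay μ ProgX.Base.WayInv (ProgX.Base.conv u₀) ProgX.Base.L.__asan_register_globals.entry (Asan.registerGlobalsSpec Toy.Spec.rt)),
    Calls Lay μ ProgX.Base.WayInv (ProgX.Base.conv u₀) Toy.L._sub_I_65535_1.entry (Asan.ctorSpec Toy.Spec.rt)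

end Toy.Spec.sub_I_65535_1
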